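-- pv_equiv track=rewrite | github.com/rahul2000rk/E-Nira | e_nira_env.py | _check_potential_mill
-- ===== SOURCE A (Python) =====
-- def _check_potential_mill(board_state, player):
--     """Checks for two pieces in a line with the third spot empty."""
--     wins = [
--         [0, 1, 2], [3, 4, 5], [6, 7, 8],  # rows
--         [0, 3, 6], [1, 4, 7], [2, 5, 8],  # columns
--         [0, 4, 8], [2, 4, 6]              # diagonals
--     ]
--     potential_mills = 0
--     for w in wins:
--         player_pieces_in_line = [pos for pos in w if board_state[pos] == player]
--         empty_spot_in_line = [pos for pos in w if board_state[pos] == 0]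
--
--         if len(player_pieces_in_line) == 2 and len(empty_spot_in_line) == 1:
--             # Make sure the empty spot is connected to the two player pieces in the mill
--             # This might need more sophisticated graph traversal or pre-defined valid connections
--             # For a simple check, we assume the 'wins' list implicitly means they are connected.
--             potential_mills += 1
--     return potential_mills
-- ===== SOURCE B (Python) =====
-- # Lines through each board position: for each cell, the other two cells of every
-- # winning line that contains it.
-- _LINES_THROUGH = {
--     0: [(1, 2), (3, 6), (4, 8)],
--     1: [(0, 2), (4, 7)],
--     2: [(0, 1), (5, 8), (4, 6)],
--     3: [(4, 5), (0, 6)],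
--     4: [(3, 5), (1, 7), (0, 8), (2, 6)],
--     5: [(3, 4), (2, 8)],
--     6: [(7, 8), (0, 3), (2, 4)],
--     7: [(6, 8), (1, 4)],
--     8: [(6, 7), (2, 5), (0, 4)],
-- }
--
--
-- def _check_potential_mill(board_state, player):
--     """Counts winning lines with two pieces of `player` and one empty spot,
--     by scanning the empty cells and looking at the lines through each."""
--     if player == 0:
--         return 0  # 0 marks empty cells; there are no pieces of "player 0"
--     count = 0
--     for pos in range(9):
--         if board_state[pos] == 0:
--             for a, b in _LINES_THROUGH[pos]:
--                 if board_state[a] == player and board_state[b] == player: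
--                     count += 1
--     return count
-- ===== Notes on version B (the rewrite author's own statement) =====
-- stated objective: alternative
-- what changed: B replaces A's per-line double filtering (count player pieces and empty spots in each of the 8 lines) with a scan over the 9 board cells: for each empty cell it looks up, in a precomputed position-to-lines table, the other two cells of every line through it and counts the lines where both hold the player.
import Mathlib
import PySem

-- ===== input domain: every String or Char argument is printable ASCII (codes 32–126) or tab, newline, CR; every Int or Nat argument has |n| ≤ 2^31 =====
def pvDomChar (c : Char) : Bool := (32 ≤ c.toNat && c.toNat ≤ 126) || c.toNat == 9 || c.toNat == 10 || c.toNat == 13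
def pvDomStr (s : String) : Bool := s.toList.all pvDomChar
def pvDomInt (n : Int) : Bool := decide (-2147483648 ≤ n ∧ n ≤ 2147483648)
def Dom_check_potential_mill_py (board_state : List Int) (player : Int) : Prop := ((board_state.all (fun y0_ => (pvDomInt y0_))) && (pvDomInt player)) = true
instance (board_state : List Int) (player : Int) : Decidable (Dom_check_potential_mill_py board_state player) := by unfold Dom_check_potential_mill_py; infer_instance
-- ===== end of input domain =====

-- B replaces A's per-line double filtering with a scan over the empty cells using a
-- precomputed position→lines table; same return value on every board of length ≥ 9 (alternative decomposition, no speed claim).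


-- ===== PORT A =====
def check_potential_mill_py (board_state : List Int) (player : Int) : Int :=
  let wins : List (List Int) := [[0,1,2],[3,4,5],[6,7,8],[0,3,6],[1,4,7],[2,5,8],[0,4,8],[2,4,6]]
  wins.foldl (fun potential_mills w =>
    let player_pieces_in_line := w.filter (fun pos => decide (PySem.List.pyGetD board_state pos 0 = player))
    let empty_spot_in_line := w.filter (fun pos => decide (PySem.List.pyGetD board_state pos 0 = 0))
    if player_pieces_in_line.length = 2 ∧ empty_spot_in_line.length = 1 then potential_mills + 1
    else potential_mills) 0

-- ===== PORT B =====
-- the module-level dict _LINES_THROUGH of Source B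
def pvLinesThrough : PySem.Dict Int (List (Int × Int)) :=
  PySem.Dict.ofList [(0, [(1,2),(3,6),(4,8)]), (1, [(0,2),(4,7)]), (2, [(0,1),(5,8),(4,6)]),
    (3, [(4,5),(0,6)]), (4, [(3,5),(1,7),(0,8),(2,6)]), (5, [(3,4),(2,8)]),
    (6, [(7,8),(0,3),(2,4)]), (7, [(6,8),(1,4)]), (8, [(6,7),(2,5),(0,4)])]

def check_potential_mill_py_alt (board_state : List Int) (player : Int) : Int :=
  if player = 0 then 0
  else
    (PySem.List.pyRange 0 9 1).foldl (fun count pos =>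
      if PySem.List.pyGetD board_state pos 0 = 0 then
        (pvLinesThrough.getD pos []).foldl (fun c ab =>
          if PySem.List.pyGetD board_state ab.1 0 = player ∧ PySem.List.pyGetD board_state ab.2 0 = player
          then c + 1 else c) count
      else count) 0

-- ===== PRECONDITION & SPEC =====
-- A indexes board_state[0..8], so it raises IndexError on boards with fewer than 9 cells; Pre_ excludes exactly those.
def Pre_check_potential_mill_py (board_state : List Int) (_player : Int) : Prop :=
  9 ≤ board_state.length
instance (board_state : List Int) (player : Int) : Decidable (Pre_check_potential_mill_py board_state player) := by unfold Pre_check_potential_mill_py; infer_instance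

def pvWitness_check_potential_mill_py : List Int × Int := ([1, 1, 0, 0, 2, 0, 0, 0, 2], 1)

def Spec_check_potential_mill_py (board_state : List Int) (player : Int) (out : Int) : Prop := out = check_potential_mill_py_alt board_state player
instance (board_state : List Int) (player : Int) (out : Int) : Decidable (Spec_check_potential_mill_py board_state player out) := by unfold Spec_check_potential_mill_py; infer_instance

-- ===== CLAIM (what is proved, stated in full; the proofs are below) =====
def Claim_equal_check_potential_mill_py : Prop := ∀ (board_state : List Int) (player : Int), Dom_check_potential_mill_py board_state player → Pre_check_potential_mill_py board_state player → Spec_check_potential_mill_py board_state player (check_potential_mill_py board_state player)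

-- ===== LEMMAS AND PROOFS =====

lemma pv_if_add_split {c : Prop} [Decidable c] (a b : Int) :
    (if c then a + b else 0) = (if c then a else 0) + (if c then b else 0) := by
  split_ifs <;> omega

-- with player = 0 both of A's filters coincide, so no line can have 2 pieces and 1 empty
lemma pv_sameFilterStep (L : Nat) (acc : Int) :
    (if (L = 2 ∧ L = 1) then acc + 1 else acc) = acc := by
  split_ifs with h
  · omega
  · rfl

lemma pv_lineInd (b : List Int) (i j k x y z p : Int) (hp : ¬ p = 0)
    (hx : PySem.List.pyGetD b i 0 = x) (hy : PySem.List.pyGetD b j 0 = y)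
    (hz : PySem.List.pyGetD b k 0 = z) :
    (if ((List.filter (fun pos => decide (PySem.List.pyGetD b pos 0 = p)) [i,j,k]).length = 2 ∧
         (List.filter (fun pos => decide (PySem.List.pyGetD b pos 0 = 0)) [i,j,k]).length = 1)
     then (1:Int) else 0)
    = (if x = 0 then (if y = p ∧ z = p then (1:Int) else 0) else 0)
    + (if y = 0 then (if x = p ∧ z = p then (1:Int) else 0) else 0)
    + (if z = 0 then (if x = p ∧ y = p then (1:Int) else 0) else 0) := by
  simp only [List.filter_cons, List.filter_nil, hx, hy, hz, decide_eq_true_eq]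
  split_ifs <;> simp_all [List.length]

lemma pv_main (b : List Int) (p v0 v1 v2 v3 v4 v5 v6 v7 v8 : Int)
    (g0 : PySem.List.pyGetD b (0:Int) 0 = v0) (g1 : PySem.List.pyGetD b (1:Int) 0 = v1)
    (g2 : PySem.List.pyGetD b (2:Int) 0 = v2) (g3 : PySem.List.pyGetD b (3:Int) 0 = v3)
    (g4 : PySem.List.pyGetD b (4:Int) 0 = v4) (g5 : PySem.List.pyGetD b (5:Int) 0 = v5)
    (g6 : PySem.List.pyGetD b (6:Int) 0 = v6) (g7 : PySem.List.pyGetD b (7:Int) 0 = v7)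
    (g8 : PySem.List.pyGetD b (8:Int) 0 = v8) :
    check_potential_mill_py b p = check_potential_mill_py_alt b p := by
  by_cases hp : p = 0
  · subst hp
    simp only [check_potential_mill_py, check_potential_mill_py_alt,
      List.foldl_cons, List.foldl_nil, pv_sameFilterStep]
    simp
  · have hr : PySem.List.pyRange 0 9 1 = [0,1,2,3,4,5,6,7,8] := by decide
    have d0 : pvLinesThrough.getD (0:Int) [] = [(1,2),(3,6),(4,8)] := by decide
    have d1 : pvLinesThrough.getD (1:Int) [] = [(0,2),(4,7)] := by decide
    have d2 : pvLinesThrough.getD (2:Int) [] = [(0,1),(5,8),(4,6)] := by decide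
    have d3 : pvLinesThrough.getD (3:Int) [] = [(4,5),(0,6)] := by decide
    have d4 : pvLinesThrough.getD (4:Int) [] = [(3,5),(1,7),(0,8),(2,6)] := by decide
    have d5 : pvLinesThrough.getD (5:Int) [] = [(3,4),(2,8)] := by decide
    have d6 : pvLinesThrough.getD (6:Int) [] = [(7,8),(0,3),(2,4)] := by decide
    have d7 : pvLinesThrough.getD (7:Int) [] = [(6,8),(1,4)] := by decide
    have d8 : pvLinesThrough.getD (8:Int) [] = [(6,7),(2,5),(0,4)] := by decide
    have hA : ∀ (acc : Int) (w : List Int),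
        (if ((List.filter (fun pos => decide (PySem.List.pyGetD b pos 0 = p)) w).length = 2 ∧
             (List.filter (fun pos => decide (PySem.List.pyGetD b pos 0 = 0)) w).length = 1)
         then acc + 1 else acc)
        = acc + (if ((List.filter (fun pos => decide (PySem.List.pyGetD b pos 0 = p)) w).length = 2 ∧
                     (List.filter (fun pos => decide (PySem.List.pyGetD b pos 0 = 0)) w).length = 1)
                 then (1:Int) else 0) := by
      intro acc w; split_ifs <;> omega
    have hB : ∀ (c : Int) (ab : Int × Int),
        (if PySem.List.pyGetD b ab.1 0 = p ∧ PySem.List.pyGetD b ab.2 0 = p then c + 1 else c)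
        = c + (if PySem.List.pyGetD b ab.1 0 = p ∧ PySem.List.pyGetD b ab.2 0 = p
               then (1:Int) else 0) := by
      intro c ab; split_ifs <;> omega
    have hG : ∀ (count s : Int) (pos : Int),
        (if PySem.List.pyGetD b pos 0 = 0 then count + s else count)
        = count + (if PySem.List.pyGetD b pos 0 = 0 then s else 0) := by
      intro count s pos; split_ifs <;> omega
    simp only [check_potential_mill_py, check_potential_mill_py_alt, if_neg hp, hr]
    simp only [hA, hB, PySem.List.foldl_add, hG]
    simp only [List.map_cons, List.map_nil, List.sum_cons, List.sum_nil]
    rw [pv_lineInd b 0 1 2 v0 v1 v2 p hp g0 g1 g2,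
        pv_lineInd b 3 4 5 v3 v4 v5 p hp g3 g4 g5,
        pv_lineInd b 6 7 8 v6 v7 v8 p hp g6 g7 g8,
        pv_lineInd b 0 3 6 v0 v3 v6 p hp g0 g3 g6,
        pv_lineInd b 1 4 7 v1 v4 v7 p hp g1 g4 g7,
        pv_lineInd b 2 5 8 v2 v5 v8 p hp g2 g5 g8,
        pv_lineInd b 0 4 8 v0 v4 v8 p hp g0 g4 g8,
        pv_lineInd b 2 4 6 v2 v4 v6 p hp g2 g4 g6]
    simp only [d0, d1, d2, d3, d4, d5, d6, d7, d8, List.map_cons, List.map_nil,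
      List.sum_cons, List.sum_nil, g0, g1, g2, g3, g4, g5, g6, g7, g8, pv_if_add_split, add_zero]
    ring

-- ===== VERDICT (by name: the statement is the Claim_ definition above) =====
theorem check_potential_mill_py_spec : Claim_equal_check_potential_mill_py := by
  intro board_state player _ hpre
  unfold Spec_check_potential_mill_py
  unfold Pre_check_potential_mill_py at hpre
  rcases board_state with _ | ⟨v0, bs⟩; · simp at hpre
  rcases bs with _ | ⟨v1, bs⟩; · simp at hpre
  rcases bs with _ | ⟨v2, bs⟩; · simp at hpre
  rcases bs with _ | ⟨v3, bs⟩; · simp at hpre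
  rcases bs with _ | ⟨v4, bs⟩; · simp at hpre
  rcases bs with _ | ⟨v5, bs⟩; · simp at hpre
  rcases bs with _ | ⟨v6, bs⟩; · simp at hpre
  rcases bs with _ | ⟨v7, bs⟩; · simp at hpre
  rcases bs with _ | ⟨v8, bs⟩; · simp at hpre
  exact pv_main _ player v0 v1 v2 v3 v4 v5 v6 v7 v8 (by simp [pysem]) (by simp [pysem])
    (by simp [pysem]) (by simp [pysem]) (by simp [pysem]) (by simp [pysem]) (by simp [pysem])
    (by simp [pysem]) (by simp [pysem])
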